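-- pv_equiv track=rewrite | github.com/skykid17/smartlp | rag/repos/splunk_repo/Splunk_TA_aws/bin/aws_cloudwatch_inputs_rh.py | _generate_endpoint_list
-- ===== SOURCE A (Python) =====
-- def _generate_endpoint_list(data):
--     """Generates list of endpoints which needs to be validated"""
--     metric_input_str = data.get("metric_namespace", [None])[0]
--     if metric_input_str:
--         metric_input_list = metric_input_str[2:-2].split('","')
--     else:
--         metric_input_list = []
--     service_mapping = {
--         "AWS/ApplicationELB": "elb_private_endpoint_url",
--         "AWS/EBS": "ec2_private_endpoint_url",
--         "AWS/EC2": "ec2_private_endpoint_url",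
--         "AWS/ELB": "elb_private_endpoint_url",
--         "AWS/Lambda": "lambda_private_endpoint_url",
--         "AWS/S3": "s3_private_endpoint_url",
--     }
--     endpoint_input_set = {
--         "sts_private_endpoint_url",
--         "monitoring_private_endpoint_url",
--     }
--     for key in service_mapping:  # pylint: disable=consider-using-dict-items
--         if key in metric_input_list:
--             endpoint_input_set.add(service_mapping[key])
--             if key == "AWS/EC2":
--                 endpoint_input_set.add("autoscaling_private_endpoint_url")
--     return endpoint_input_set
-- ===== SOURCE B (Python) =====
-- def _generate_endpoint_list(data):
--     """Generates list of endpoints which needs to be validated"""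
--     metric_input_str = data.get("metric_namespace", [None])[0]
--     if metric_input_str:
--         metric_input_list = metric_input_str[2:-2].split('","')
--     else:
--         metric_input_list = []
--     # One pass over the selected namespaces, recording which services occur,
--     # instead of scanning the list once per mapping key.
--     app_elb = ebs = ec2 = elb = lam = s3 = False
--     for ns in metric_input_list:
--         if ns == "AWS/ApplicationELB":
--             app_elb = True
--         elif ns == "AWS/EBS":
--             ebs = True
--         elif ns == "AWS/EC2":
--             ec2 = True
--         elif ns == "AWS/ELB":
--             elb = True
--         elif ns == "AWS/Lambda":
--             lam = True
--         elif ns == "AWS/S3":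
--             s3 = True
--     endpoints = ["sts_private_endpoint_url", "monitoring_private_endpoint_url"]
--     if app_elb:
--         endpoints.append("elb_private_endpoint_url")
--     if ebs:
--         endpoints.append("ec2_private_endpoint_url")
--     if ec2:
--         endpoints.append("ec2_private_endpoint_url")
--         endpoints.append("autoscaling_private_endpoint_url")
--     if elb:
--         endpoints.append("elb_private_endpoint_url")
--     if lam:
--         endpoints.append("lambda_private_endpoint_url")
--     if s3:
--         endpoints.append("s3_private_endpoint_url")
--     return set(endpoints)
-- ===== Notes on version B (the rewrite author's own statement) =====
-- stated objective: alternative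
-- what changed: Instead of iterating the fixed 6-key service mapping and scanning the namespace list once per key, B makes a single flag-collecting pass over the parsed namespace list and then assembles the endpoint set directly from the six flags.
import Mathlib
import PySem

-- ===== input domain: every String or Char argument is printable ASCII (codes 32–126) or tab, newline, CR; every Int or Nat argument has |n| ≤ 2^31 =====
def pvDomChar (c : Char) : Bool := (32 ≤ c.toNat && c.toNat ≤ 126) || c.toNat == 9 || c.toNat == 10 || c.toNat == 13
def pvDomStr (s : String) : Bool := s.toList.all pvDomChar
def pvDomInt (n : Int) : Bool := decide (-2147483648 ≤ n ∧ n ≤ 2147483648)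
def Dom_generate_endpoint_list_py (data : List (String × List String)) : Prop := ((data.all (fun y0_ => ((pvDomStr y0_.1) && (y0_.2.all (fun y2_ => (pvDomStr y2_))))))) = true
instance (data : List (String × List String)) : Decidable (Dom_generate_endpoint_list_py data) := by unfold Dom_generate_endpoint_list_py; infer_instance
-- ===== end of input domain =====

-- B replaces A's six membership scans of the namespace list (one per mapping key)
-- by a single flag-collecting pass over the namespace list; objective: alternative.


-- shared by neither Spec_ nor Pre_: each port computes its own namespace list below

-- ===== PORT A =====
-- metric_input_str = data.get("metric_namespace", [None])[0]; if truthy, [2:-2].split('","')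
-- (data.get is first-match lookup; [0] on an empty stored list is IndexError — excluded by Pre_, port returns [] there)
def pyParseNamespacesA (data : List (String × List String)) : List String :=
  match List.lookup "metric_namespace" data with
  | none => []                      -- default [None][0] = None, falsy
  | some xs =>
    match PySem.List.pyGet? xs 0 with
    | none => []                    -- Python raises IndexError here (outside Pre_)
    | some s =>
      if s ≠ "" then (PySem.Str.split? (PySem.Str.slice s (some 2) (some (-2))) "\",\"").getD []
      else []

-- the dict literal, in insertion order; the loop reads key and value of each item
def pyServiceMapping : List (String × String) :=
  [("AWS/ApplicationELB", "elb_private_endpoint_url"),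
   ("AWS/EBS", "ec2_private_endpoint_url"),
   ("AWS/EC2", "ec2_private_endpoint_url"),
   ("AWS/ELB", "elb_private_endpoint_url"),
   ("AWS/Lambda", "lambda_private_endpoint_url"),
   ("AWS/S3", "s3_private_endpoint_url")]

def generate_endpoint_list_py (data : List (String × List String)) : List String :=
  let metric_input_list := pyParseNamespacesA data
  pyServiceMapping.foldl
    (fun st kv =>
      if metric_input_list.contains kv.1 then
        let st := PySem.Set.add st kv.2
        if kv.1 = "AWS/EC2" then PySem.Set.add st "autoscaling_private_endpoint_url" else st
      else st)
    (PySem.Set.ofList ["sts_private_endpoint_url", "monitoring_private_endpoint_url"])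

-- ===== PORT B =====
def pyParseNamespacesB (data : List (String × List String)) : List String :=
  match List.lookup "metric_namespace" data with
  | none => []
  | some xs =>
    match PySem.List.pyGet? xs 0 with
    | none => []                    -- Python raises IndexError here (outside Pre_)
    | some s =>
      if s ≠ "" then (PySem.Str.split? (PySem.Str.slice s (some 2) (some (-2))) "\",\"").getD []
      else []

-- the single flag-collecting pass: (app_elb, ebs, ec2, elb, lam, s3)
def pyCollectFlags (l : List String) : Bool × Bool × Bool × Bool × Bool × Bool :=
  l.foldl
    (fun f ns =>
      if ns = "AWS/ApplicationELB" then (true, f.2)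
      else if ns = "AWS/EBS" then (f.1, true, f.2.2)
      else if ns = "AWS/EC2" then (f.1, f.2.1, true, f.2.2.2)
      else if ns = "AWS/ELB" then (f.1, f.2.1, f.2.2.1, true, f.2.2.2.2)
      else if ns = "AWS/Lambda" then (f.1, f.2.1, f.2.2.1, f.2.2.2.1, true, f.2.2.2.2.2)
      else if ns = "AWS/S3" then (f.1, f.2.1, f.2.2.1, f.2.2.2.1, f.2.2.2.2.1, true)
      else f)
    (false, false, false, false, false, false)

def generate_endpoint_list_py_alt (data : List (String × List String)) : List String :=
  let metric_input_list := pyParseNamespacesB data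
  let f := pyCollectFlags metric_input_list
  let endpoints :=
    ["sts_private_endpoint_url", "monitoring_private_endpoint_url"]
    ++ (if f.1 then ["elb_private_endpoint_url"] else [])
    ++ (if f.2.1 then ["ec2_private_endpoint_url"] else [])
    ++ (if f.2.2.1 then ["ec2_private_endpoint_url", "autoscaling_private_endpoint_url"] else [])
    ++ (if f.2.2.2.1 then ["elb_private_endpoint_url"] else [])
    ++ (if f.2.2.2.2.1 then ["lambda_private_endpoint_url"] else [])
    ++ (if f.2.2.2.2.2 then ["s3_private_endpoint_url"] else [])
  PySem.Set.ofList endpoints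

-- ===== PRECONDITION & SPEC =====
-- Pre_ excludes only inputs where A raises IndexError: "metric_namespace" stored with an
-- empty list, so data.get(...)[0] fails (B raises identically there).
def Pre_generate_endpoint_list_py (data : List (String × List String)) : Prop :=
  List.lookup "metric_namespace" data ≠ some []
instance (data : List (String × List String)) : Decidable (Pre_generate_endpoint_list_py data) := by unfold Pre_generate_endpoint_list_py; infer_instance

def pvWitness_generate_endpoint_list_py : (List (String × List String)) :=
  [("metric_namespace", ["[\"AWS/EC2\",\"AWS/S3\"]"])]

def Spec_generate_endpoint_list_py (data : List (String × List String)) (out : List String) : Prop := out = generate_endpoint_list_py_alt data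
instance (data : List (String × List String)) (out : List String) : Decidable (Spec_generate_endpoint_list_py data out) := by unfold Spec_generate_endpoint_list_py; infer_instance

-- ===== CLAIM (what is proved, stated in full; the proofs are below) =====
def Claim_equal_generate_endpoint_list_py : Prop := ∀ (data : List (String × List String)), Dom_generate_endpoint_list_py data → Pre_generate_endpoint_list_py data → Spec_generate_endpoint_list_py data (generate_endpoint_list_py data)

-- ===== LEMMAS AND PROOFS =====

-- the flag pass computes exactly the six membership tests A performs
theorem collectFlags_eq (l : List String) :
    pyCollectFlags l =
      (l.contains "AWS/ApplicationELB", l.contains "AWS/EBS", l.contains "AWS/EC2",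
       l.contains "AWS/ELB", l.contains "AWS/Lambda", l.contains "AWS/S3") := by
  unfold pyCollectFlags
  suffices h : ∀ (l : List String) (f : Bool × Bool × Bool × Bool × Bool × Bool),
      l.foldl
        (fun f ns =>
          if ns = "AWS/ApplicationELB" then (true, f.2)
          else if ns = "AWS/EBS" then (f.1, true, f.2.2)
          else if ns = "AWS/EC2" then (f.1, f.2.1, true, f.2.2.2)
          else if ns = "AWS/ELB" then (f.1, f.2.1, f.2.2.1, true, f.2.2.2.2)
          else if ns = "AWS/Lambda" then (f.1, f.2.1, f.2.2.1, f.2.2.2.1, true, f.2.2.2.2.2)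
          else if ns = "AWS/S3" then (f.1, f.2.1, f.2.2.1, f.2.2.2.1, f.2.2.2.2.1, true)
          else f) f =
      (f.1 || l.contains "AWS/ApplicationELB", f.2.1 || l.contains "AWS/EBS",
       f.2.2.1 || l.contains "AWS/EC2", f.2.2.2.1 || l.contains "AWS/ELB",
       f.2.2.2.2.1 || l.contains "AWS/Lambda", f.2.2.2.2.2 || l.contains "AWS/S3") by
    simpa using h l (false, false, false, false, false, false)
  intro l
  induction l with
  | nil => intro f; simp
  | cons x xs ih =>
    intro f
    simp only [List.foldl_cons, List.contains_cons]
    split_ifs with h1 h2 h3 h4 h5 h6 <;> rw [ih] <;> clear ih <;> subst_eqs <;>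
      simp_all [beq_eq_decide, eq_comm, Bool.or_comm]

-- ===== VERDICT (by name: the statement is the Claim_ definition above) =====
theorem generate_endpoint_list_py_spec : Claim_equal_generate_endpoint_list_py := by
  intro data _ _
  unfold Spec_generate_endpoint_list_py generate_endpoint_list_py generate_endpoint_list_py_alt
  have hparse : pyParseNamespacesA data = pyParseNamespacesB data := rfl
  rw [hparse]
  generalize pyParseNamespacesB data = m
  simp only [pyServiceMapping, collectFlags_eq, List.foldl_cons, List.foldl_nil]
  cases hc1 : m.contains "AWS/ApplicationELB" <;>
  cases hc2 : m.contains "AWS/EBS" <;>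
  cases hc3 : m.contains "AWS/EC2" <;>
  cases hc4 : m.contains "AWS/ELB" <;>
  cases hc5 : m.contains "AWS/Lambda" <;>
  cases hc6 : m.contains "AWS/S3" <;>
    decide
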